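-- pv_equiv track=rewrite | github.com/dsagman/bulgarian-solitaire | bulgarian_solitaire.py | stopHands
-- ===== SOURCE A (Python) =====
-- Deck = list[list[int]]
--
-- SeenAtIndex = int
--
-- def piles(x : int) -> Deck:
--     # The split is to just take one card, but that can be adjusted
--     cut = 1
--     return [list(range(1,cut+1)),(list(range(cut+1,x+1)))]
--
-- def takeAcard(xs : Deck) -> Deck:
--     return [[n.pop() for n in xs]] + list(filter(None, xs))
--
-- def pileSize(xs : list[Deck]) -> Deck:
--     return sorted(map(len,xs))
--
-- def stopHands(x : int) -> tuple[SeenAtIndex, Deck]: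
--     hands = [pileSize(piles(x))]
--     aHand = takeAcard(piles(x))
--     while (ps := pileSize(aHand)) not in hands:
--         hands.append(ps)
--         aHand = takeAcard(aHand)
--     hands.append(ps)
--     return (hands.index(ps) + 1,hands)
-- ===== SOURCE B (Python) =====
-- # B: Floyd's tortoise-and-hare cycle detection on the orbit of sorted pile-size
-- # lists: no seen-collection, no membership scans; mu (tail length) and lam
-- # (cycle length) come from the classic three phases, then the hands list is
-- # regenerated once. Return value only: A mutates its piles with pop, B does not.
-- def stopHands(x: int) -> tuple[int, list[list[int]]]:
--     def step(s):
--         return sorted([len(s)] + [v - 1 for v in s if v > 1])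
--
--     s0 = sorted(v for v in (1, x - 1) if v > 0)
--     # phase 1: find a meeting point s_n == s_{2n}
--     t, h = step(s0), step(step(s0))
--     while t != h:
--         t, h = step(t), step(step(h))
--     # phase 2: find mu, the first index on the cycle
--     t = s0
--     mu = 0
--     while t != h:
--         t, h = step(t), step(h)
--         mu += 1
--     # phase 3: find lam, the cycle length
--     lam = 1
--     h = step(t)
--     while t != h:
--         h = step(h)
--         lam += 1
--     # regenerate the first mu + lam + 1 states
--     hands = [s0]
--     cur = s0
--     for _ in range(mu + lam):
--         cur = step(cur)
--         hands.append(cur)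
--     return (mu + 1, hands)
-- ===== Notes on version B (the rewrite author's own statement) =====
-- stated objective: alternative
-- what changed: B replaces A's seen-list membership scan and final hands.index pass with Floyd's tortoise-and-hare cycle detection on the orbit of sorted pile-size lists (no seen collection at all): three pointer-chasing phases find the tail length mu and cycle length lam, and the hands list is regenerated once, returning (mu+1, first mu+lam+1 states).
-- outside the precondition, e.g. on stopHands(1): A raises IndexError, B returns (1, [[1], [1]])
import Mathlib
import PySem

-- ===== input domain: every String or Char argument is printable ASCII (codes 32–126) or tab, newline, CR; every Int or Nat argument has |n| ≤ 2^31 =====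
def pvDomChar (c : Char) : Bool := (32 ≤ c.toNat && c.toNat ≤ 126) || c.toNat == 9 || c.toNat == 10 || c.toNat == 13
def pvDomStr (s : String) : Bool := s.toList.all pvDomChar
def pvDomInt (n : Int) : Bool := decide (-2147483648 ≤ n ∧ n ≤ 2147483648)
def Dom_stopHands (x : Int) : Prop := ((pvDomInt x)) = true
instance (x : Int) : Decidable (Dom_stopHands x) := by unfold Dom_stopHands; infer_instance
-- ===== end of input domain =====

-- B replaces A's seen-list membership scans with Floyd's tortoise-and-hare cycle
-- detection on the orbit of sorted pile-size lists (objective: alternative;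
-- return value only — Python A mutates its piles with pop, B does not).

-- ===== PORT A =====
-- piles(x) = [list(range(1,2)), list(range(2,x+1))]
def pilesA (x : Int) : List (List Int) :=
  [PySem.List.pyRange 1 2 1, PySem.List.pyRange 2 (x + 1) 1]

-- takeAcard: n.pop() on each pile (none = IndexError on an empty pile); the popped
-- cards become a new first pile and emptied piles are filtered out.
def takeAcardA (xs : List (List Int)) : Option (List (List Int)) :=
  (xs.mapM (fun n => PySem.List.pop? n (-1))).map
    (fun rs => rs.map (·.1) :: (rs.map (·.2)).filter (· ≠ []))

-- pileSize = sorted(map(len, xs))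
def pileSizeA (xs : List (List Int)) : List Int :=
  PySem.List.sorted (xs.map (fun n => (n.length : Int))) (fun s => s) false

-- A's while loop; fuel 2^(x+2) bounds the iterations (each one appends a state not
-- seen before, and the states are partitions of x, of which there are < 2^x)
def loopA (fuel : Nat) (hands : List (List Int)) (aHand : List (List Int)) :
    Int × List (List Int) :=
  match fuel with
  | 0 => (0, [])
  | fuel + 1 =>
    let ps := pileSizeA aHand
    if ps ∈ hands then
      let hands' := hands ++ [ps]
      ((((PySem.List.index? hands' ps).getD 0 : Nat) : Int) + 1, hands')
    else
      match takeAcardA aHand with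
      | none => (0, [])        -- IndexError (outside Pre_)
      | some h => loopA fuel (hands ++ [ps]) h

def stopHands (x : Int) : Int × List (List Int) :=
  let hands := [pileSizeA (pilesA x)]
  match takeAcardA (pilesA x) with
  | none => (0, [])            -- IndexError (outside Pre_)
  | some aHand => loopA (2 ^ (x.toNat + 2)) hands aHand

-- ===== PORT B =====
-- step(s) = sorted([len(s)] + [v - 1 for v in s if v > 1])
def stepB (sizes : List Int) : List Int :=
  PySem.List.sorted
    ((sizes.length : Int) :: (sizes.filter (fun v => decide (1 < v))).map (· - 1))
    (fun s => s) false

-- s0 = sorted(v for v in (1, x - 1) if v > 0)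
def initB (x : Int) : List Int :=
  PySem.List.sorted (([1, x - 1] : List Int).filter (fun v => decide (0 < v)))
    (fun s => s) false

-- phase 1: while t != h: t, h = step(t), step(step(h)); returns h at the meeting
def loopMeet (fuel : Nat) (t h : List Int) : List Int :=
  match fuel with
  | 0 => []
  | fuel + 1 => if t = h then h else loopMeet fuel (stepB t) (stepB (stepB h))

-- phase 2: while t != h: t, h = step(t), step(h); mu += 1; returns (mu, t)
def loopMu (fuel : Nat) (t h : List Int) (mu : Int) : Int × List Int :=
  match fuel with
  | 0 => (0, [])
  | fuel + 1 => if t = h then (mu, t) else loopMu fuel (stepB t) (stepB h) (mu + 1)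

-- phase 3: while t != h: h = step(h); lam += 1; returns lam
def loopLam (fuel : Nat) (t h : List Int) (lam : Int) : Int :=
  match fuel with
  | 0 => 0
  | fuel + 1 => if t = h then lam else loopLam fuel t (stepB h) (lam + 1)

-- for _ in range(n): cur = step(cur); hands.append(cur)
def buildHands (n : Nat) (hands : List (List Int)) (cur : List Int) : List (List Int) :=
  match n with
  | 0 => hands
  | n + 1 => buildHands n (hands ++ [stepB cur]) (stepB cur)

def stopHands_alt (x : Int) : Int × List (List Int) :=
  let s0 := initB x
  let F := 2 ^ (x.toNat + 2)   -- fuel; the loops stop long before (see the proofs)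
  let h := loopMeet F (stepB s0) (stepB (stepB s0))
  let mt := loopMu F s0 h 0
  let lam := loopLam F mt.2 (stepB mt.2) 1
  (mt.1 + 1, buildHands (mt.1 + lam).toNat [s0] s0)

-- ===== PRECONDITION & SPEC =====
-- Pre_ excludes exactly x ≤ 1, where A pops from the empty second pile (IndexError).
def Pre_stopHands (x : Int) : Prop := 2 ≤ x
instance (x : Int) : Decidable (Pre_stopHands x) := by unfold Pre_stopHands; infer_instance
def pvWitness_stopHands : Int := 5

def Spec_stopHands (x : Int) (out : Int × List (List Int)) : Prop := out = stopHands_alt x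
instance (x : Int) (out : Int × List (List Int)) : Decidable (Spec_stopHands x out) := by unfold Spec_stopHands; infer_instance

-- ===== CLAIM (what is proved, stated in full; the proofs are below) =====
def Claim_equal_stopHands : Prop := ∀ (x : Int), Dom_stopHands x → Pre_stopHands x → Spec_stopHands x (stopHands x)

-- ===== LEMMAS AND PROOFS =====

-- ---------- A-side deck machinery ----------

-- deck invariant: a nonempty list of nonempty piles
def DAn (xs : List (List Int)) : Prop := xs ≠ [] ∧ ∀ n ∈ xs, n ≠ []

theorem pop_of_ne_nil (n : List Int) (h : n ≠ []) :
    ∃ v, PySem.List.pop? n (-1) = some (v, n.dropLast) := by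
  rcases List.eq_nil_or_concat n with rfl | ⟨l, b, rfl⟩
  · exact absurd rfl h
  · exact ⟨b, by simp [List.concat_eq_append, PySem.List.pop?_last]⟩

theorem mapM_pop_of_nonempty (xs : List (List Int)) (h : ∀ n ∈ xs, n ≠ []) :
    ∃ rs, xs.mapM (fun n => PySem.List.pop? n (-1)) = some rs ∧
      rs.map (·.2) = xs.map List.dropLast ∧ rs.length = xs.length := by
  induction xs with
  | nil => exact ⟨[], by simp⟩
  | cons n xs ih =>
    obtain ⟨v, hv⟩ := pop_of_ne_nil n (h n (by simp))
    obtain ⟨rs, hrs, h2, h3⟩ := ih (fun m hm => h m (by simp [hm]))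
    exact ⟨(v, n.dropLast) :: rs, by simp [List.mapM_cons, hv, hrs], by simp [h2], by simp [h3]⟩

theorem takeAcard_some {xs : List (List Int)} (h : DAn xs) :
    ∃ p, takeAcardA xs = some (p :: (xs.map List.dropLast).filter (· ≠ [])) ∧
      p.length = xs.length := by
  obtain ⟨rs, hrs, h2, h3⟩ := mapM_pop_of_nonempty xs h.2
  exact ⟨rs.map (·.1), by simp [takeAcardA, hrs, h2], by simp [h3]⟩

-- the lengths of the surviving decremented piles, as B computes them from the sizes
theorem filter_dropLast_len (xs : List (List Int)) (h : ∀ n ∈ xs, n ≠ []) :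
    ((xs.map List.dropLast).filter (· ≠ [])).map (fun n => (n.length : Int)) =
      ((xs.map (fun n => (n.length : Int))).filter (fun v => decide (1 < v))).map (· - 1) := by
  induction xs with
  | nil => simp
  | cons n xs ih =>
    have hn : n ≠ [] := h n (by simp)
    have h1 : 1 ≤ n.length := List.length_pos_of_ne_nil hn
    have ih' := ih (fun m hm => h m (by simp [hm]))
    simp only [List.map_cons]
    by_cases hlen : 1 < n.length
    · have hd : n.dropLast ≠ [] := by
        intro he
        have hld : n.dropLast.length = n.length - 1 := (List.length_dropLast (xs := n))
        rw [he] at hld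
        simp at hld; omega
      rw [List.filter_cons_of_pos (by simpa using hd),
        List.filter_cons_of_pos (by simp; exact_mod_cast hlen),
        List.map_cons, List.map_cons, ih']
      congr 1
      have hld : n.dropLast.length = n.length - 1 := (List.length_dropLast (xs := n))
      rw [hld]; push_cast [h1]; ring
    · have hlen1 : n.length = 1 := by omega
      have hd : n.dropLast = [] := by
        have hld : n.dropLast.length = n.length - 1 := (List.length_dropLast (xs := n))
        rw [hlen1] at hld
        exact List.eq_nil_of_length_eq_zero hld
      rw [List.filter_cons_of_neg (by simp [hd]),
        List.filter_cons_of_neg (by simp; exact_mod_cast Nat.not_lt.mp hlen), ih']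

-- the key step lemma: B's step on the sizes matches A's takeAcard on the deck
theorem step_eq {xs ys : List (List Int)} (h : DAn xs)
    (hy : takeAcardA xs = some ys) :
    pileSizeA ys = stepB (pileSizeA xs) ∧ DAn ys := by
  obtain ⟨p, hp, hplen⟩ := takeAcard_some h
  rw [hp] at hy
  obtain rfl := Option.some.inj hy
  constructor
  · unfold pileSizeA stepB
    apply PySem.List.sorted_eq_sorted_of_perm _ _ _ (fun a b hab => hab)
    rw [List.map_cons, hplen, filter_dropLast_len xs h.2]
    rw [PySem.List.length_sorted]; rw [List.length_map]
    refine List.Perm.cons _ ?_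
    exact ((PySem.List.sorted_perm (xs.map (fun n => (n.length : Int))) (fun s => s) false).filter _).map _ |>.symm
  · refine ⟨by simp, ?_⟩
    intro m hm
    rcases List.mem_cons.mp hm with rfl | hm
    · intro he; rw [he] at hplen; simp at hplen; exact h.1 (List.eq_nil_of_length_eq_zero hplen.symm)
    · simpa using (List.mem_filter.mp hm).2

theorem pilesA_sizes {x : Int} (hx : 2 ≤ x) :
    (pilesA x).map (fun n => (n.length : Int)) = [1, x - 1] := by
  simp only [pilesA, List.map_cons, List.map_nil, PySem.List.length_pyRange_one,
    List.cons.injEq, and_true]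
  omega

theorem init_sizes {x : Int} (hx : 2 ≤ x) :
    pileSizeA (pilesA x) = initB x := by
  unfold pileSizeA initB
  rw [pilesA_sizes hx]
  have hf : (([1, x - 1] : List Int).filter (fun v => decide (0 < v))) = [1, x - 1] := by
    rw [List.filter_cons_of_pos (by decide), List.filter_cons_of_pos (by simp; omega)]
    rfl
  rw [hf]

theorem pilesA_DAn {x : Int} (hx : 2 ≤ x) : DAn (pilesA x) := by
  refine ⟨by simp [pilesA], ?_⟩
  intro n hn
  simp only [pilesA, List.mem_cons, List.not_mem_nil, or_false] at hn
  rcases hn with rfl | rfl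
  · rw [PySem.List.pyRange_one_cons (by norm_num)]; simp
  · rw [PySem.List.pyRange_one_cons (by omega)]; simp

-- ---------- the orbit of sorted pile-size states ----------

def sOrb (x : Int) (n : Nat) : List Int := stepB^[n] (initB x)

theorem sOrb_succ (x : Int) (n : Nat) : sOrb x (n + 1) = stepB (sOrb x n) :=
  Function.iterate_succ_apply' _ _ _

-- a valid state: nonempty, positive entries, total x
def GoodL (x : Int) (l : List Int) : Prop := l ≠ [] ∧ (∀ v ∈ l, 1 ≤ v) ∧ l.sum = x

theorem sum_dec_filter (l : List Int) (h : ∀ v ∈ l, 1 ≤ v) :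
    (((l.filter (fun v => decide (1 < v))).map (· - 1))).sum = l.sum - l.length := by
  induction l with
  | nil => simp
  | cons a t ih =>
    have ha : 1 ≤ a := h a (by simp)
    have ih' := ih (fun v hv => h v (by simp [hv]))
    by_cases h1 : 1 < a
    · rw [List.filter_cons_of_pos (by simpa using h1)]
      simp only [List.map_cons, List.sum_cons, List.length_cons, ih']
      push_cast; ring
    · have : a = 1 := by omega
      rw [List.filter_cons_of_neg (by simpa using h1)]
      simp only [List.sum_cons, List.length_cons, ih', this]
      push_cast; ring

theorem stepB_good {x : Int} {l : List Int} (h : GoodL x l) : GoodL x (stepB l) := by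
  obtain ⟨hne, hpos, hsum⟩ := h
  have hperm := PySem.List.sorted_perm
    ((l.length : Int) :: (l.filter (fun v => decide (1 < v))).map (· - 1)) (fun s => s) false
  unfold stepB
  refine ⟨?_, ?_, ?_⟩
  · rw [Ne, PySem.List.sorted_eq_nil_iff]; simp
  · intro v hv
    rw [PySem.List.mem_sorted] at hv
    rcases List.mem_cons.mp hv with rfl | hv
    · have := List.length_pos_of_ne_nil hne; exact_mod_cast this
    · obtain ⟨u, hu, rfl⟩ := List.mem_map.mp hv
      have := List.mem_filter.mp hu
      have : 1 < u := by simpa using this.2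
      omega
  · rw [hperm.sum_eq]
    simp only [List.sum_cons, sum_dec_filter l hpos, hsum]
    ring

theorem initB_good {x : Int} (hx : 2 ≤ x) : GoodL x (initB x) := by
  have hf : (([1, x - 1] : List Int).filter (fun v => decide (0 < v))) = [1, x - 1] := by
    rw [List.filter_cons_of_pos (by decide), List.filter_cons_of_pos (by simp; omega)]
    rfl
  have hperm := PySem.List.sorted_perm (([1, x - 1] : List Int).filter (fun v => decide (0 < v))) (fun s => s) false
  rw [hf] at hperm
  unfold initB
  refine ⟨?_, ?_, ?_⟩
  · rw [Ne, PySem.List.sorted_eq_nil_iff, hf]; simp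
  · intro v hv
    rw [hf, PySem.List.mem_sorted] at hv
    simp only [List.mem_cons, List.not_mem_nil, or_false] at hv
    rcases hv with rfl | rfl
    · omega
    · omega
  · rw [hf, hperm.sum_eq]; simp

theorem sOrb_good {x : Int} (hx : 2 ≤ x) (n : Nat) : GoodL x (sOrb x n) := by
  induction n with
  | zero => exact initB_good hx
  | succ n ih => rw [sOrb_succ]; exact stepB_good ih

-- ---------- counting states: prefix sums inject partitions into subsets of [1,x] ----------

def psums : List Int → List Int
  | [] => []
  | a :: t => a :: (psums t).map (a + ·)

theorem psums_inj {l l' : List Int} (h : psums l = psums l') : l = l' := by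
  induction l generalizing l' with
  | nil => cases l' with
    | nil => rfl
    | cons a t => simp [psums] at h
  | cons a t ih =>
    cases l' with
    | nil => simp [psums] at h
    | cons a' t' =>
      simp only [psums, List.cons.injEq] at h
      obtain ⟨rfl, h2⟩ := h
      have : psums t = psums t' :=
        List.map_injective_iff.mpr (fun u v huv => by omega) h2
      rw [ih this]

theorem mem_psums_bounds {l : List Int} (hpos : ∀ v ∈ l, 1 ≤ v) :
    ∀ p ∈ psums l, 1 ≤ p ∧ p ≤ l.sum := by
  induction l with
  | nil => simp [psums]
  | cons a t ih =>
    have ha : 1 ≤ a := hpos a (by simp)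
    have hsum : 0 ≤ t.sum := List.sum_nonneg (fun v hv => by
      have := hpos v (by simp [hv]); omega)
    intro p hp
    simp only [psums, List.mem_cons, List.mem_map] at hp
    rcases hp with rfl | ⟨q, hq, rfl⟩
    · simp; omega
    · have := ih (fun v hv => hpos v (by simp [hv])) q hq
      simp; omega

theorem psums_pairwise_lt {l : List Int} (hpos : ∀ v ∈ l, 1 ≤ v) :
    (psums l).Pairwise (· < ·) := by
  induction l with
  | nil => simp [psums]
  | cons a t ih =>
    have ih' := ih (fun v hv => hpos v (by simp [hv]))
    refine List.pairwise_cons.mpr ⟨?_, ?_⟩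
    · intro p hp
      simp only [List.mem_map] at hp
      obtain ⟨q, hq, rfl⟩ := hp
      have := (mem_psums_bounds (fun v hv => hpos v (by simp [hv])) q hq).1
      omega
    · exact List.Pairwise.map _ (fun u v huv => by omega) ih'

theorem state_eq_of_psums_toFinset {l l' : List Int}
    (hl : ∀ v ∈ l, 1 ≤ v) (hl' : ∀ v ∈ l', 1 ≤ v)
    (h : (psums l).toFinset = (psums l').toFinset) : l = l' := by
  have p1 := psums_pairwise_lt hl
  have p2 := psums_pairwise_lt hl'
  have hperm := List.perm_of_nodup_nodup_toFinset_eq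
    (p1.imp (fun h => ne_of_lt h)) (p2.imp (fun h => ne_of_lt h)) h
  exact psums_inj (hperm.eq_of_pairwise (fun a b _ _ h1 h2 => absurd h2 (asymm h1)) p1 p2)

theorem orbit_collision {x : Int} (hx : 2 ≤ x) :
    ∃ i j : Nat, i < j ∧ j ≤ 2 ^ x.toNat ∧ sOrb x i = sOrb x j := by
  have hmaps : ∀ n ∈ Finset.range (2 ^ x.toNat + 1),
      (psums (sOrb x n)).toFinset ∈ (Finset.Icc (1 : Int) x).powerset := by
    intro n _
    rw [Finset.mem_powerset]
    intro p hp
    rw [List.mem_toFinset] at hp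
    obtain ⟨hg1, hg2, hg3⟩ := sOrb_good hx n
    have := mem_psums_bounds hg2 p hp
    rw [Finset.mem_Icc]
    omega
  have hcard : (Finset.Icc (1 : Int) x).powerset.card < (Finset.range (2 ^ x.toNat + 1)).card := by
    rw [Finset.card_powerset, Finset.card_range, Int.card_Icc]
    have : (x + 1 - 1).toNat = x.toNat := by omega
    rw [this]
    omega
  obtain ⟨i, hi, j, hj, hne, heq⟩ :=
    Finset.exists_ne_map_eq_of_card_lt_of_maps_to hcard hmaps
  have hstates : sOrb x i = sOrb x j :=
    state_eq_of_psums_toFinset (sOrb_good hx i).2.1 (sOrb_good hx j).2.1 heq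
  rcases Nat.lt_or_ge i j with h | h
  · exact ⟨i, j, h, by simpa using Nat.lt_succ_iff.mp (Finset.mem_range.mp hj), hstates⟩
  · have : j < i := by omega
    exact ⟨j, i, by omega, by simpa using Nat.lt_succ_iff.mp (Finset.mem_range.mp hi), hstates.symm⟩

-- ---------- eventual periodicity of an orbit ----------

theorem orbit_shift (s : Nat → List Int) (hs : ∀ n, s (n + 1) = stepB (s n))
    (a p : Nat) (hap : s (a + p) = s a) : ∀ n, a ≤ n → s (n + p) = s n := by
  intro n hn
  induction n, hn using Nat.le_induction with
  | base => exact hap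
  | succ n hn ih =>
    rw [show n + 1 + p = (n + p) + 1 by omega, hs, ih, ← hs]

theorem orbit_multiple (s : Nat → List Int) (hs : ∀ n, s (n + 1) = stepB (s n))
    (mu lam : Nat) (hml : s (mu + lam) = s mu) :
    ∀ (k n : Nat), mu ≤ n → s (n + k * lam) = s n := by
  intro k
  induction k with
  | zero => simp
  | succ k ih =>
    intro n hn
    rw [show n + (k + 1) * lam = (n + k * lam) + lam by ring,
      orbit_shift s hs mu lam hml _ (by omega), ih n hn]

theorem mu_le_of_repeat (s : Nat → List Int) (mu : Nat)
    (hmin : ∀ m, m < mu → ¬∃ p, 0 < p ∧ s (m + p) = s m)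
    (a p : Nat) (hp : 0 < p) (hap : s (a + p) = s a) : mu ≤ a := by
  by_contra hlt
  exact hmin a (by omega) ⟨p, hp, hap⟩

theorem lam_dvd (s : Nat → List Int) (hs : ∀ n, s (n + 1) = stepB (s n))
    (mu lam : Nat) (hlam : 0 < lam) (hml : s (mu + lam) = s mu)
    (hlammin : ∀ p, 0 < p → p < lam → s (mu + p) ≠ s mu)
    (m p : Nat) (hp : 0 < p) (hmp : s (m + p) = s m) : lam ∣ p := by
  have hQ : ∀ n, m ≤ n → s (n + p) = s n := orbit_shift s hs m p hmp
  obtain ⟨q, r, hrlt, hpd⟩ : ∃ q r, r < lam ∧ p = lam * q + r :=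
    ⟨p / lam, p % lam, Nat.mod_lt _ hlam, (Nat.div_add_mod p lam).symm⟩
  subst hpd
  have hn0 : m ≤ mu + m * lam := by
    calc m ≤ m * lam := Nat.le_mul_of_pos_right m hlam
    _ ≤ mu + m * lam := by omega
  have s1 : s (mu + m * lam + (lam * q + r)) = s (mu + m * lam) := hQ _ hn0
  have s2 : s (mu + m * lam) = s mu := orbit_multiple s hs mu lam hml m mu (le_refl _)
  have s3 : s (mu + m * lam + (lam * q + r)) = s (mu + r) := by
    rw [show mu + m * lam + (lam * q + r) = (mu + r) + (m + q) * lam by ring]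
    exact orbit_multiple s hs mu lam hml _ _ (by omega)
  have hfin : s (mu + r) = s mu := by rw [← s3, s1, s2]
  rcases Nat.eq_zero_or_pos r with h0 | hpos
  · exact ⟨q, by omega⟩
  · exact absurd hfin (hlammin r hpos hrlt)

-- ---------- B's loops on the orbit ----------

theorem loopMeet_eq (s : Nat → List Int) (hs : ∀ n, s (n + 1) = stepB (s n))
    (N : Nat) (hN : 1 ≤ N ∧ s N = s (2 * N))
    (hNmin : ∀ n, 1 ≤ n → n < N → s n ≠ s (2 * n)) :
    ∀ (fuel i : Nat), 1 ≤ i → i ≤ N → N + 1 ≤ i + fuel →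
      loopMeet fuel (s i) (s (2 * i)) = s (2 * N) := by
  intro fuel
  induction fuel with
  | zero => intro i h1 h2 h3; omega
  | succ fuel ih =>
    intro i h1 h2 h3
    rw [loopMeet]
    by_cases he : s i = s (2 * i)
    · have : i = N := by
        rcases Nat.lt_or_ge i N with h | h
        · exact absurd he (hNmin i h1 h)
        · omega
      subst this
      rw [if_pos he]
    · rw [if_neg he, ← hs, ← hs, ← hs,
        show 2 * i + 1 + 1 = 2 * (i + 1) by ring]
      have hiN : i < N := by
        rcases Nat.lt_or_ge i N with h | h
        · exact h
        · have : i = N := by omega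
          exact absurd (this ▸ hN.2) he
      exact ih (i + 1) (by omega) (by omega) (by omega)

theorem loopMu_eq (s : Nat → List Int) (hs : ∀ n, s (n + 1) = stepB (s n))
    (mu N : Nat)
    (heq : ∀ i, mu ≤ i → s (2 * N + i) = s i)
    (hne : ∀ i, i < mu → s i ≠ s (2 * N + i)) :
    ∀ (fuel i : Nat), i ≤ mu → mu + 1 ≤ i + fuel →
      loopMu fuel (s i) (s (2 * N + i)) (i : Int) = ((mu : Int), s mu) := by
  intro fuel
  induction fuel with
  | zero => intro i h1 h2; omega
  | succ fuel ih =>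
    intro i h1 h2
    rw [loopMu]
    by_cases he : s i = s (2 * N + i)
    · have : i = mu := by
        rcases Nat.lt_or_ge i mu with h | h
        · exact absurd he (hne i h)
        · omega
      subst this
      rw [if_pos he]
    · have himu : i < mu := by
        rcases Nat.lt_or_ge i mu with h | h
        · exact h
        · have : i = mu := by omega
          exact absurd ((heq i (by omega)).symm) (this ▸ he)
      rw [if_neg he, ← hs, ← hs, show 2 * N + i + 1 = 2 * N + (i + 1) by ring]
      have := ih (i + 1) (by omega) (by omega)
      rw [show ((i : Int) + 1) = ((i + 1 : Nat) : Int) by push_cast; ring]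
      exact this

theorem loopLam_eq (s : Nat → List Int) (hs : ∀ n, s (n + 1) = stepB (s n))
    (mu lam : Nat) (hlam : 0 < lam) (hml : s (mu + lam) = s mu)
    (hlammin : ∀ p, 0 < p → p < lam → s (mu + p) ≠ s mu) :
    ∀ (fuel p : Nat), 1 ≤ p → p ≤ lam → lam + 1 ≤ p + fuel →
      loopLam fuel (s mu) (s (mu + p)) (p : Int) = (lam : Int) := by
  intro fuel
  induction fuel with
  | zero => intro p h1 h2 h3; omega
  | succ fuel ih =>
    intro p h1 h2 h3
    rw [loopLam]
    by_cases he : s mu = s (mu + p)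
    · have : p = lam := by
        rcases Nat.lt_or_ge p lam with h | h
        · exact absurd he.symm (hlammin p h1 h)
        · omega
      subst this
      rw [if_pos he]
    · have hpl : p < lam := by
        rcases Nat.lt_or_ge p lam with h | h
        · exact h
        · have : p = lam := by omega
          subst this; exact absurd hml.symm he
      rw [if_neg he, ← hs, show mu + p + 1 = mu + (p + 1) by ring]
      have := ih (p + 1) (by omega) (by omega) (by omega)
      rw [show ((p : Int) + 1) = ((p + 1 : Nat) : Int) by push_cast; ring]
      exact this

theorem buildHands_eq (s : Nat → List Int) (hs : ∀ n, s (n + 1) = stepB (s n)) :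
    ∀ (m n : Nat), buildHands m ((List.range (n + 1)).map s) (s n) =
      (List.range (n + 1 + m)).map s := by
  intro m
  induction m with
  | zero => intro n; simp [buildHands]
  | succ m ih =>
    intro n
    have hsplit : (List.range (n + 1)).map s ++ [s (n + 1)] = (List.range (n + 2)).map s := by
      conv_rhs => rw [show n + 2 = (n + 1) + 1 from rfl, List.range_succ, List.map_append, List.map_singleton]
    rw [buildHands, ← hs, hsplit, ih (n + 1), show n + 1 + 1 + m = n + 1 + (m + 1) by ring]

-- ---------- A's loop on the orbit ----------

theorem index_first (s : Nat → List Int) (K mu : Nat) (hmu : mu ≤ K)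
    (heq : s mu = s K) (hne : ∀ j, j < mu → s j ≠ s K) :
    PySem.List.index? ((List.range (K + 1)).map s) (s K) = some mu := by
  rw [PySem.List.index?_eq_some_iff]
  refine ⟨(List.range mu).map s, ((List.range (K - mu)).map (fun k => mu + 1 + k)).map s, ?_, by simp, ?_⟩
  · have hidx : List.range (K + 1) =
        List.range mu ++ mu :: (List.range (K - mu)).map (fun k => mu + 1 + k) := by
      rw [show K + 1 = (mu + 1) + (K - mu) by omega, List.range_add, List.range_succ,
        List.append_assoc, List.singleton_append]
    rw [hidx, List.map_append, List.map_cons, heq]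
  · intro hmem
    obtain ⟨j, hj, hjeq⟩ := List.mem_map.mp hmem
    exact hne j (List.mem_range.mp hj) hjeq

theorem loopA_eq (x : Int) (K mu : Nat) (hmuK : mu < K)
    (hfirst : ∀ k, k < K → ¬∃ j, j < k ∧ sOrb x j = sOrb x k)
    (heq : sOrb x mu = sOrb x K) (hne : ∀ j, j < mu → sOrb x j ≠ sOrb x K) :
    ∀ (fuel n : Nat) (aHand : List (List Int)), DAn aHand →
      pileSizeA aHand = sOrb x (n + 1) → n + 1 ≤ K → K + 1 ≤ n + 1 + fuel →
      loopA fuel ((List.range (n + 1)).map (sOrb x)) aHand =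
        ((mu : Int) + 1, (List.range (K + 1)).map (sOrb x)) := by
  intro fuel
  induction fuel with
  | zero => intro n aHand _ _ h3 h4; omega
  | succ fuel ih =>
    intro n aHand hDA hps h3 h4
    rw [loopA]
    simp only [hps]
    by_cases hnK : n + 1 = K
    · rw [hnK]
      have hmem : sOrb x K ∈ (List.range K).map (sOrb x) :=
        List.mem_map.mpr ⟨mu, List.mem_range.mpr hmuK, heq⟩
      rw [if_pos hmem]
      have hh : (List.range K).map (sOrb x) ++ [sOrb x K] = (List.range (K + 1)).map (sOrb x) := by
        rw [List.range_succ]; simp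
      rw [hh, index_first (sOrb x) K mu (le_of_lt hmuK) heq hne]
      rfl
    · have hlt : n + 1 < K := by omega
      have hnmem : sOrb x (n + 1) ∉ (List.range (n + 1)).map (sOrb x) := by
        intro hmem
        obtain ⟨j, hj, hjeq⟩ := List.mem_map.mp hmem
        exact hfirst (n + 1) hlt ⟨j, List.mem_range.mp hj, hjeq⟩
      rw [if_neg hnmem]
      obtain ⟨p, hp, hplen⟩ := takeAcard_some hDA
      rw [hp]
      obtain ⟨hstep, hDA'⟩ := step_eq hDA hp
      have hps' : pileSizeA (p :: (aHand.map List.dropLast).filter (· ≠ [])) = sOrb x (n + 1 + 1) := by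
        rw [hstep, hps, ← sOrb_succ]
      have hh : (List.range (n + 1)).map (sOrb x) ++ [sOrb x (n + 1)] = (List.range (n + 2)).map (sOrb x) := by
        conv_rhs => rw [show n + 2 = (n + 1) + 1 from rfl, List.range_succ, List.map_append, List.map_singleton]
      rw [hh]
      exact ih (n + 1) _ hDA' hps' (by omega) (by omega)

-- ---------- master equivalence ----------

theorem master_eq (x : Int) (hx : 2 ≤ x) : stopHands x = stopHands_alt x := by
  classical
  have hs : ∀ n, sOrb x (n + 1) = stepB (sOrb x n) := sOrb_succ x
  -- a collision in the orbit, hence the minimal preperiod mu and period lam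
  obtain ⟨i, j, hij, hj2, hijeq⟩ := orbit_collision hx
  have hex : ∃ m, ∃ p, 0 < p ∧ sOrb x (m + p) = sOrb x m :=
    ⟨i, j - i, by omega, by rw [show i + (j - i) = j by omega]; exact hijeq.symm⟩
  set mu := Nat.find hex with hmudef
  have hmu_spec : ∃ p, 0 < p ∧ sOrb x (mu + p) = sOrb x mu := Nat.find_spec hex
  have hmu_min : ∀ m, m < mu → ¬∃ p, 0 < p ∧ sOrb x (m + p) = sOrb x m :=
    fun m hm => Nat.find_min hex hm
  set lam := Nat.find hmu_spec with hlamdef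
  have hlam_spec : 0 < lam ∧ sOrb x (mu + lam) = sOrb x mu := Nat.find_spec hmu_spec
  have hlam_min : ∀ p, 0 < p → p < lam → sOrb x (mu + p) ≠ sOrb x mu :=
    fun p h1 h2 hcon => Nat.find_min hmu_spec h2 ⟨h1, hcon⟩
  have hlam0 : 0 < lam := hlam_spec.1
  have hml : sOrb x (mu + lam) = sOrb x mu := hlam_spec.2
  -- bounds: mu + lam ≤ j ≤ 2^x
  have hmu_le_i : mu ≤ i := Nat.find_min' hex ⟨j - i, by omega,
    by rw [show i + (j - i) = j by omega]; exact hijeq.symm⟩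
  have hlam_dvd_ji : lam ∣ (j - i) := lam_dvd (sOrb x) hs mu lam hlam0 hml hlam_min i (j - i)
    (by omega) (by rw [show i + (j - i) = j by omega]; exact hijeq.symm)
  have hlam_le : lam ≤ j - i := Nat.le_of_dvd (by omega) hlam_dvd_ji
  have hK2 : mu + lam ≤ 2 ^ x.toNat := by omega
  have hF : 2 ^ x.toNat + 2 ≤ 2 ^ (x.toNat + 2) := by
    have h1 : 1 ≤ 2 ^ x.toNat := Nat.one_le_two_pow
    rw [pow_succ, pow_succ]
    omega
  -- A stops exactly at K = mu + lam, and the first occurrence of s K is at mu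
  have hfirst : ∀ k, k < mu + lam → ¬∃ j', j' < k ∧ sOrb x j' = sOrb x k := by
    rintro k hk ⟨j', hj', hjeq⟩
    have hmuj : mu ≤ j' := mu_le_of_repeat (sOrb x) mu hmu_min j' (k - j') (by omega)
      (by rw [show j' + (k - j') = k by omega]; exact hjeq.symm)
    have hdvd : lam ∣ (k - j') := lam_dvd (sOrb x) hs mu lam hlam0 hml hlam_min j' (k - j')
      (by omega) (by rw [show j' + (k - j') = k by omega]; exact hjeq.symm)
    have := Nat.le_of_dvd (by omega) hdvd
    omega
  have heqK : sOrb x mu = sOrb x (mu + lam) := hml.symm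
  have hneK : ∀ j', j' < mu → sOrb x j' ≠ sOrb x (mu + lam) := by
    intro j' hj' hcon
    have : mu ≤ j' := mu_le_of_repeat (sOrb x) mu hmu_min j' (mu + lam - j') (by omega)
      (by rw [show j' + (mu + lam - j') = mu + lam by omega]; exact hcon.symm)
    omega
  -- the tortoise-hare meeting point N: mu ≤ N, lam ∣ N, N ≤ mu + lam
  have hwit1 : 1 ≤ (mu / lam + 1) * lam := Nat.mul_pos (Nat.succ_pos _) hlam0
  have hwit2 : sOrb x ((mu / lam + 1) * lam) = sOrb x (2 * ((mu / lam + 1) * lam)) := by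
    rw [show 2 * ((mu / lam + 1) * lam) = (mu / lam + 1) * lam + (mu / lam + 1) * lam by ring]
    have hmlt : mu ≤ (mu / lam + 1) * lam := by
      have h1 := Nat.div_add_mod mu lam
      have h2 := Nat.mod_lt mu hlam0
      have h3 : (mu / lam + 1) * lam = lam * (mu / lam) + lam := by ring
      omega
    exact (orbit_multiple (sOrb x) hs mu lam hml (mu / lam + 1) _ hmlt).symm
  have hn0 : ∃ n, 1 ≤ n ∧ sOrb x n = sOrb x (2 * n) := ⟨(mu / lam + 1) * lam, hwit1, hwit2⟩
  set N := Nat.find hn0 with hNdef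
  have hN : 1 ≤ N ∧ sOrb x N = sOrb x (2 * N) := Nat.find_spec hn0
  have hNmin : ∀ n, 1 ≤ n → n < N → sOrb x n ≠ sOrb x (2 * n) :=
    fun n h1 h2 hcon => Nat.find_min hn0 h2 ⟨h1, hcon⟩
  have hNle : N ≤ mu + lam := by
    have hNle' : N ≤ (mu / lam + 1) * lam := Nat.find_min' hn0 ⟨hwit1, hwit2⟩
    have hwit : (mu / lam + 1) * lam ≤ mu + lam := by
      have h1 := Nat.div_mul_le_self mu lam
      have h2 : (mu / lam + 1) * lam = mu / lam * lam + lam := by ring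
      omega
    omega
  have hmuN : mu ≤ N := mu_le_of_repeat (sOrb x) mu hmu_min N N (by omega)
    (by rw [show N + N = 2 * N by ring]; exact hN.2.symm)
  have hlamN : lam ∣ N := lam_dvd (sOrb x) hs mu lam hlam0 hml hlam_min N N (by omega)
    (by rw [show N + N = 2 * N by ring]; exact hN.2.symm)
  obtain ⟨t, hNt⟩ := hlamN
  have heq2N : ∀ i', mu ≤ i' → sOrb x (2 * N + i') = sOrb x i' := by
    intro i' hi'
    rw [show 2 * N + i' = i' + (2 * t) * lam by rw [hNt]; ring]
    exact orbit_multiple (sOrb x) hs mu lam hml (2 * t) i' hi'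
  have hne2N : ∀ i', i' < mu → sOrb x i' ≠ sOrb x (2 * N + i') := by
    intro i' hi' hcon
    have : mu ≤ i' := mu_le_of_repeat (sOrb x) mu hmu_min i' (2 * N) (by omega)
      (by rw [show i' + 2 * N = 2 * N + i' by ring]; exact hcon.symm)
    omega
  -- both programs compute ((mu : Int) + 1, s 0 .. s (mu + lam))
  have hA : stopHands x = ((mu : Int) + 1, (List.range (mu + lam + 1)).map (sOrb x)) := by
    unfold stopHands
    obtain ⟨p0, hp0, _⟩ := takeAcard_some (pilesA_DAn hx)
    rw [hp0]
    obtain ⟨hstep0, hDA0⟩ := step_eq (pilesA_DAn hx) hp0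
    have hps0 : pileSizeA (p0 :: ((pilesA x).map List.dropLast).filter (· ≠ [])) = sOrb x 1 := by
      rw [hstep0, init_sizes hx]
      show stepB (sOrb x 0) = sOrb x 1
      exact (hs 0).symm
    have hhands0 : [pileSizeA (pilesA x)] = (List.range 1).map (sOrb x) := by
      rw [init_sizes hx]
      rfl
    rw [hhands0]
    exact loopA_eq x (mu + lam) mu (by omega) hfirst heqK hneK
      (2 ^ (x.toNat + 2)) 0 _ hDA0 hps0 (by omega) (by omega)
  have hB : stopHands_alt x = ((mu : Int) + 1, (List.range (mu + lam + 1)).map (sOrb x)) := by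
    unfold stopHands_alt
    have e0 : sOrb x 0 = initB x := rfl
    have e1 : stepB (initB x) = sOrb x 1 := by rw [← e0]; exact (hs 0).symm
    have e2 : stepB (sOrb x 1) = sOrb x 2 := (hs 1).symm
    have hMeet : loopMeet (2 ^ (x.toNat + 2)) (sOrb x 1) (sOrb x 2) = sOrb x (2 * N) := by
      have := loopMeet_eq (sOrb x) hs N hN hNmin (2 ^ (x.toNat + 2)) 1 (le_refl 1)
        (by omega) (by omega)
      rw [show 2 * 1 = 2 by ring] at this
      exact this
    have hMu : loopMu (2 ^ (x.toNat + 2)) (initB x) (sOrb x (2 * N)) 0 =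
        ((mu : Int), sOrb x mu) := by
      have := loopMu_eq (sOrb x) hs mu N heq2N hne2N (2 ^ (x.toNat + 2)) 0 (by omega) (by omega)
      simpa using this
    have hLam : loopLam (2 ^ (x.toNat + 2)) (sOrb x mu) (stepB (sOrb x mu)) 1 = (lam : Int) := by
      have := loopLam_eq (sOrb x) hs mu lam hlam0 hml hlam_min (2 ^ (x.toNat + 2)) 1
        (le_refl 1) (by omega) (by omega)
      rw [hs mu] at this
      simpa using this
    simp only [e1, e2, hMeet, hMu, hLam]
    have hcast : ((mu : Int) + (lam : Int)).toNat = mu + lam := by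
      rw [show (mu : Int) + (lam : Int) = ((mu + lam : Nat) : Int) by push_cast; ring,
        Int.toNat_natCast]
    rw [hcast]
    have hsingle : [initB x] = (List.range 1).map (sOrb x) := rfl
    rw [hsingle, show initB x = sOrb x 0 from rfl,
      buildHands_eq (sOrb x) hs (mu + lam) 0, show 0 + 1 + (mu + lam) = mu + lam + 1 by ring]
  rw [hA, hB]

-- ===== VERDICT (by name: the statement is the Claim_ definition above) =====
theorem stopHands_spec : Claim_equal_stopHands := by
  intro x _ hx
  unfold Spec_stopHands
  exact master_eq x hx
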